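-- pv_equiv track=rewrite | github.com/shivakumari2515/shivakumari2515 | program 23.py | min_key_presses
-- ===== SOURCE A (Python) =====
-- def min_key_presses(s):
--     target = int(s)
--     presses = 0
--
--     while target > 0:
--         if target % 100 == 0:
--             target //= 100
--         else:
--             target //= 10
--         presses += 1
--
--     return presses
-- ===== SOURCE B (Python) =====
-- def min_key_presses(s):
--     target = int(s)
--     if target <= 0:
--         return 0
--     presses = 0
--     run = 0
--     for ch in str(target):
--         if ch == '0':
--             run += 1
--         else:
--             presses += (run + 1) // 2 + 1
--             run = 0
--     return presses + (run + 1) // 2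
-- ===== Notes on version B (the rewrite author's own statement) =====
-- stated objective: alternative
-- what changed: B makes one left-to-right pass over the decimal string with run-length arithmetic: every nonzero digit costs one press and every maximal run of k zeros costs ceil(k/2) presses, replacing A's repeated greedy integer divisions by 100 or 10.
import Mathlib
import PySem

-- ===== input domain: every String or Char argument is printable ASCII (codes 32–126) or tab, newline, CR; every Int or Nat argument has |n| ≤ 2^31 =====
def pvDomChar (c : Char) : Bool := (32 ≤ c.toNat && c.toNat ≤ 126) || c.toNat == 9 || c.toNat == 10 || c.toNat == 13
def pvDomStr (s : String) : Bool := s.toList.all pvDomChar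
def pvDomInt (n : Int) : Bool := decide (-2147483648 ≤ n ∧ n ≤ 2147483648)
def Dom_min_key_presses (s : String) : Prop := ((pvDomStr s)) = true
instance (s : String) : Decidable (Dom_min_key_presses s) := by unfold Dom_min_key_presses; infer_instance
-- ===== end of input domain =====

-- B replaces A's repeated greedy divisions by 100/10 with one left-to-right pass over the decimal
-- string: each nonzero digit costs one press, each maximal run of k zeros costs ceil(k/2) presses
-- (objective: alternative).

-- ===== PORT A =====
-- the while loop of A: divide by 100 when target % 100 == 0 else by 10, counting presses
def pvALoop (target presses : Int) : Int :=
  if h : target > 0 then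
    pvALoop (if PySem.Int.mod target 100 = 0 then PySem.Int.floordiv target 100
             else PySem.Int.floordiv target 10) (presses + 1)
  else presses
termination_by target.toNat
decreasing_by
  simp only [PySem.Int.floordiv_eq_ediv_of_pos (a := target) (by norm_num : (0:Int) < 100),
             PySem.Int.floordiv_eq_ediv_of_pos (a := target) (by norm_num : (0:Int) < 10)]
  split <;> omega

def min_key_presses (s : String) : Int :=
  match PySem.Int.ofStr? s with        -- int(s); none = ValueError, excluded by Pre_
  | some target => pvALoop target 0
  | none => 0

-- ===== PORT B =====
-- B's loop body: state (presses, run); a '0' extends the current zero run, any other digit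
-- closes the run at ceil(run/2) presses and costs one press itself
def pvBStep (st : Int × Int) (c : Char) : Int × Int :=
  if c = '0' then (st.1, st.2 + 1)
  else (st.1 + PySem.Int.floordiv (st.2 + 1) 2 + 1, 0)

def min_key_presses_alt (s : String) : Int :=
  match PySem.Int.ofStr? s with        -- int(s); none = ValueError, excluded by Pre_
  | some target =>
    if target ≤ 0 then 0
    else
      let st := (PySem.Int.toChars target).foldl pvBStep (0, 0)   -- for ch in str(target)
      st.1 + PySem.Int.floordiv (st.2 + 1) 2
  | none => 0

-- ===== PRECONDITION & SPEC =====
-- Pre_ excludes exactly the strings on which int(s) raises ValueError in A.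
def Pre_min_key_presses (s : String) : Prop := (PySem.Int.ofStr? s).isSome = true
instance (s : String) : Decidable (Pre_min_key_presses s) := by unfold Pre_min_key_presses; infer_instance
def pvWitness_min_key_presses : String := "20300"

def Spec_min_key_presses (s : String) (out : Int) : Prop := out = min_key_presses_alt s
instance (s : String) (out : Int) : Decidable (Spec_min_key_presses s out) := by unfold Spec_min_key_presses; infer_instance

-- ===== CLAIM (what is proved, stated in full; the proofs are below) =====
def Claim_equal_min_key_presses : Prop := ∀ (s : String), Dom_min_key_presses s → Pre_min_key_presses s → Spec_min_key_presses s (min_key_presses s)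

-- ===== LEMMAS AND PROOFS =====

-- A's press count as a function of a natural number
def pvG (m : Nat) : Int :=
  if m > 0 then (if m % 100 = 0 then pvG (m / 100) else pvG (m / 10)) + 1 else 0
termination_by m
decreasing_by all_goals exact Nat.div_lt_self (by omega) (by omega)

-- number of trailing decimal zeros
def pvZ (m : Nat) : Nat :=
  if m % 10 = 0 ∧ m > 0 then pvZ (m / 10) + 1 else 0
termination_by m
decreasing_by exact Nat.div_lt_self (by omega) (by omega)

-- m with its trailing zeros stripped
def pvStrip (m : Nat) : Nat := m / 10 ^ (pvZ m)

lemma pvALoop_eq_g : ∀ (m : Nat) (p : Int), pvALoop (m : Int) p = p + pvG m := by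
  intro m
  induction m using Nat.strong_induction_on with
  | _ m ih =>
    intro p
    rw [pvALoop, pvG]
    by_cases hm : 0 < m
    · rw [dif_pos (by exact_mod_cast hm), if_pos hm]
      rw [(by norm_num : (100:Int) = ((100:Nat):Int)), PySem.Int.mod_natCast,
          PySem.Int.floordiv_natCast, (by norm_num : (10:Int) = ((10:Nat):Int)),
          PySem.Int.floordiv_natCast]
      by_cases hc : m % 100 = 0
      · rw [if_pos (by exact_mod_cast hc), if_pos hc,
            ih (m / 100) (Nat.div_lt_self hm (by omega))]
        ring
      · rw [if_neg (by exact_mod_cast hc), if_neg hc,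
            ih (m / 10) (Nat.div_lt_self hm (by omega))]
        ring
    · rw [dif_neg (by omega), if_neg hm]
      ring

lemma pvZ_pos (m : Nat) (h1 : m % 10 = 0) (h2 : 0 < m) : pvZ m = pvZ (m / 10) + 1 := by
  rw [pvZ, if_pos ⟨h1, h2⟩]

lemma pvZ_zero (m : Nat) (h : ¬ (m % 10 = 0 ∧ 0 < m)) : pvZ m = 0 := by
  rw [pvZ, if_neg h]

lemma pvStrip_step (m : Nat) (h1 : m % 10 = 0) (h2 : 0 < m) : pvStrip m = pvStrip (m / 10) := by
  unfold pvStrip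
  rw [pvZ_pos m h1 h2, pow_succ, Nat.mul_comm, ← Nat.div_div_eq_div_mul]

-- A's count decomposes over the trailing zero run: pvG m = pvG (strip m) + ceil(z m / 2)
lemma pvG_strip : ∀ (m : Nat), 0 < m → pvG m = pvG (pvStrip m) + (((pvZ m + 1) / 2 : Nat) : Int) := by
  intro m
  induction m using Nat.strong_induction_on with
  | _ m ih =>
    intro hm
    by_cases h10 : m % 10 = 0
    · have hge : 10 ≤ m := by omega
      by_cases h100 : m % 100 = 0
      · -- at least two trailing zeros: A consumes both in one press
        have hge2 : 100 ≤ m := by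
          rcases Nat.eq_zero_or_pos (m / 100) with h0 | h
          · exfalso; omega
          · omega
        have hq10 : (m / 10) % 10 = 0 := by omega
        have hz : pvZ m = pvZ (m / 100) + 2 := by
          rw [pvZ_pos m h10 hm, pvZ_pos (m / 10) hq10 (by omega),
              Nat.div_div_eq_div_mul]
        have hs : pvStrip m = pvStrip (m / 100) := by
          rw [pvStrip_step m h10 hm, pvStrip_step (m / 10) hq10 (by omega),
              Nat.div_div_eq_div_mul]
        rw [pvG, if_pos hm, if_pos h100, hz, hs,
            ih (m / 100) (Nat.div_lt_self hm (by omega)) (by omega)]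
        have : (pvZ (m / 100) + 2 + 1) / 2 = (pvZ (m / 100) + 1) / 2 + 1 := by omega
        rw [this]
        push_cast; ring
      · -- exactly one trailing zero
        have hq10 : ¬ ((m / 10) % 10 = 0) := by omega
        have hz : pvZ m = 1 := by
          rw [pvZ_pos m h10 hm, pvZ_zero (m / 10) (by tauto)]
        have hs : pvStrip m = m / 10 := by
          rw [pvStrip_step m h10 hm]
          unfold pvStrip
          rw [pvZ_zero (m / 10) (by tauto)]
          simp
        rw [pvG, if_pos hm, if_neg h100, hz, hs]
        norm_num
    · -- no trailing zero
      have hz : pvZ m = 0 := pvZ_zero m (by tauto)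
      have hs : pvStrip m = m := by unfold pvStrip; rw [hz]; simp
      rw [hz, hs]
      norm_num

-- ----- decimal rendering lemmas (Nat.toDigitsCore plumbing) -----

lemma pv_toDigitsCore_acc (b : Nat) : ∀ (f n : Nat) (acc : List Char),
    Nat.toDigitsCore b f n acc = Nat.toDigitsCore b f n [] ++ acc := by
  intro f
  induction f with
  | zero => intro n acc; simp [Nat.toDigitsCore]
  | succ f ih =>
    intro n acc
    simp only [Nat.toDigitsCore]
    by_cases h : n / b = 0
    · simp [h]
    · simp only [h, if_false]
      rw [ih (n / b) (Nat.digitChar (n % b) :: acc), ih (n / b) [Nat.digitChar (n % b)]]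
      simp

lemma pv_toDigitsCore_fuel (m : Nat) : ∀ (f : Nat) (acc : List Char), m < f →
    Nat.toDigitsCore 10 f m acc = Nat.toDigitsCore 10 (m + 1) m acc := by
  induction m using Nat.strong_induction_on with
  | _ m ih =>
    intro f acc hf
    match f, hf with
    | f + 1, _ =>
      simp only [Nat.toDigitsCore]
      by_cases h : m / 10 = 0
      · simp [h]
      · simp only [h, if_false]
        have hlt : m / 10 < m := Nat.div_lt_self (by omega) (by omega)
        rw [ih (m / 10) hlt f _ (by omega), ih (m / 10) hlt m _ (by omega)]

lemma pv_toDigits_split (m : Nat) (h : 10 ≤ m) :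
    Nat.toDigits 10 m = Nat.toDigits 10 (m / 10) ++ [Nat.digitChar (m % 10)] := by
  have h0 : m / 10 ≠ 0 := by omega
  have hlt : m / 10 < m := Nat.div_lt_self (by omega) (by omega)
  show Nat.toDigitsCore 10 (m + 1) m [] = _
  simp only [Nat.toDigitsCore, h0, if_false]
  rw [pv_toDigitsCore_fuel (m / 10) m _ (by omega),
      pv_toDigitsCore_acc 10 (m / 10 + 1) (m / 10) [Nat.digitChar (m % 10)]]
  rfl

lemma pv_toDigits_small (m : Nat) (h : m < 10) : Nat.toDigits 10 m = [Nat.digitChar m] := by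
  show Nat.toDigitsCore 10 (m + 1) m [] = _
  simp [Nat.toDigitsCore, Nat.div_eq_of_lt h, Nat.mod_eq_of_lt h]

lemma pv_digitChar_eq_zero (d : Nat) (h : d < 10) : Nat.digitChar d = '0' ↔ d = 0 := by
  interval_cases d <;> simp [Nat.digitChar]

-- main invariant: B's fold state over the digits of m is (A's count of the stripped number, trailing-zero count)
lemma pv_fold_inv : ∀ (m : Nat), 0 < m →
    (Nat.toDigits 10 m).foldl pvBStep (0, 0) = (pvG (pvStrip m), ((pvZ m : Nat) : Int)) := by
  intro m
  induction m using Nat.strong_induction_on with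
  | _ m ih =>
    intro hm
    by_cases h10 : m < 10
    · rw [pv_toDigits_small m h10]
      have hne : Nat.digitChar m ≠ '0' := by
        intro h; exact absurd ((pv_digitChar_eq_zero m h10).mp h) (by omega)
      have hz : pvZ m = 0 := pvZ_zero m (by omega)
      have hs : pvStrip m = m := by unfold pvStrip; rw [hz]; simp
      have hgm : pvG m = 1 := by
        rw [pvG, if_pos hm, if_neg (by omega), pvG,
            if_neg (by simp [Nat.div_eq_of_lt h10])]
        norm_num
      simp only [List.foldl, pvBStep, if_neg hne, hz, hs, hgm]
      decide
    · rw [pv_toDigits_split m (by omega), List.foldl_append,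
          ih (m / 10) (Nat.div_lt_self hm (by omega)) (by omega)]
      simp only [List.foldl, pvBStep]
      by_cases hd : m % 10 = 0
      · rw [if_pos (by rw [pv_digitChar_eq_zero _ (Nat.mod_lt _ (by omega))]; exact hd)]
        rw [pvZ_pos m hd hm, pvStrip_step m hd hm]
        push_cast; ring_nf
      · rw [if_neg (by rw [pv_digitChar_eq_zero _ (Nat.mod_lt _ (by omega))]; exact hd)]
        have hz : pvZ m = 0 := pvZ_zero m (by tauto)
        have hs : pvStrip m = m := by unfold pvStrip; rw [hz]; simp
        have hfd : PySem.Int.floordiv (((pvZ (m / 10) : Nat) : Int) + 1) 2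
            = (((pvZ (m / 10) + 1) / 2 : Nat) : Int) := by
          rw [(by push_cast; ring : (((pvZ (m / 10) : Nat) : Int) + 1) = ((pvZ (m / 10) + 1 : Nat) : Int)),
              (by norm_num : (2:Int) = ((2:Nat):Int)), PySem.Int.floordiv_natCast]
        rw [hfd, ← pvG_strip (m / 10) (by omega)]
        have hgm : pvG m = pvG (m / 10) + 1 := by
          rw [pvG, if_pos hm, if_neg (by omega)]
        rw [hz, hs, hgm]
        norm_num

-- ===== VERDICT (by name: the statement is the Claim_ definition above) =====
theorem min_key_presses_spec : Claim_equal_min_key_presses := by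
  intro s _ hpre
  unfold Spec_min_key_presses min_key_presses min_key_presses_alt
  cases hval : PySem.Int.ofStr? s with
  | none => rfl
  | some target =>
    simp only
    by_cases hle : target ≤ 0
    · rw [if_pos hle, pvALoop, dif_neg (by omega)]
    · rw [if_neg hle]
      have hm : target = ((target.toNat : Nat) : Int) := by omega
      have hchars : PySem.Int.toChars target = Nat.toDigits 10 target.toNat := by
        unfold PySem.Int.toChars
        rw [if_neg (by omega)]
      rw [hchars, hm, pvALoop_eq_g]
      simp only [Int.toNat_natCast]
      rw [pv_fold_inv target.toNat (by omega)]
      simp only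
      have hfd : PySem.Int.floordiv (((pvZ target.toNat : Nat) : Int) + 1) 2
          = (((pvZ target.toNat + 1) / 2 : Nat) : Int) := by
        rw [(by push_cast; ring : (((pvZ target.toNat : Nat) : Int) + 1) = ((pvZ target.toNat + 1 : Nat) : Int)),
            (by norm_num : (2:Int) = ((2:Nat):Int)), PySem.Int.floordiv_natCast]
      rw [hfd, ← pvG_strip target.toNat (by omega)]
      ring
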